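-- pv_equiv track=rewrite | github.com/VSUA/TextBrowser | Text-Based Browser/task/browser/browser.py | remove_dot
-- ===== SOURCE A (Python) =====
-- def remove_dot(url):
--     reverse_url = url[::-1]
--     for char in reverse_url:
--         if char != ".":
--             reverse_url = reverse_url.lstrip(char)
--         else:
--             reverse_url = reverse_url.lstrip(char)
--             break
--     return reverse_url[::-1]
-- ===== SOURCE B (Python) =====
-- def remove_dot(url):
--     # Keep everything before the trailing run of dots that ends at the last dot
--     # (empty result when there is no dot): skip the last segment, then the dot run.
--     i = len(url)
--     while i > 0 and url[i - 1] != '.':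
--         i -= 1
--     while i > 0 and url[i - 1] == '.':
--         i -= 1
--     return url[:i]
-- ===== Notes on version B (the rewrite author's own statement) =====
-- stated objective: faster
-- what changed: A reverses the string and repeatedly lstrips each character of the reversed snapshot until it strips the dot run; B finds the cut point directly with two right-to-left index scans (skip the last segment, then the trailing dot run) and returns one slice, with no reversal and no repeated string rebuilding.
import Mathlib
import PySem

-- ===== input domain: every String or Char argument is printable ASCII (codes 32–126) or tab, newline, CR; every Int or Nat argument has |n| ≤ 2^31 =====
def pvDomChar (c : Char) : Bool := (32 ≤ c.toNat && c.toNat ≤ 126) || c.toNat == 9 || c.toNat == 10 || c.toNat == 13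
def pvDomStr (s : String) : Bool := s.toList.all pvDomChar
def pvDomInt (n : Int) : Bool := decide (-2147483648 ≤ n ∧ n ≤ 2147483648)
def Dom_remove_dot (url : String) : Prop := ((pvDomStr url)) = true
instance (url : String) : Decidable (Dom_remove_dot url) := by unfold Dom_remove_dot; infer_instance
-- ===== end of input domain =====

-- B replaces A's string-reversal + per-character lstrip loop by two right-to-left
-- index scans (skip the last segment, then the dot run) and one slice; objective: faster
-- (A rebuilds the string each lstrip, quadratic on dot-free input; B is a single linear scan).


-- ===== PORT A =====
-- `for char in reverse_url: … lstrip(char) … break`: the loop iterates over the ORIGINAL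
-- reversed string (snapshot), rebinding `reverse_url`; `lstrip(c)` with a single-character
-- argument is exactly `dropWhile (· == c)` (hand-ported, exact).
def removeDotLoop (snapshot cur : List Char) : List Char :=
  match snapshot, cur with
  | [], cur => cur
  | c :: rest, cur =>
    if c ≠ '.' then removeDotLoop rest (cur.dropWhile (· == c))
    else cur.dropWhile (· == '.')

def remove_dot (url : String) : String :=
  let rev := url.toList.reverse            -- url[::-1]
  String.ofList (removeDotLoop rev rev).reverse -- loop, then [::-1]

-- ===== PORT B =====
-- `while i > 0 and url[i-1] != '.': i -= 1` (every access is in range, so getD is exact)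
def bSkipSeg (l : List Char) : Nat → Nat
  | 0 => 0
  | i + 1 => if l.getD i ' ' ≠ '.' then bSkipSeg l i else i + 1

-- `while i > 0 and url[i-1] == '.': i -= 1`
def bSkipDots (l : List Char) : Nat → Nat
  | 0 => 0
  | i + 1 => if l.getD i ' ' = '.' then bSkipDots l i else i + 1

def remove_dot_alt (url : String) : String :=
  let l := url.toList
  String.ofList (l.take (bSkipDots l (bSkipSeg l l.length)))  -- url[:i]

-- ===== PRECONDITION & SPEC =====
def Spec_remove_dot (url : String) (out : String) : Prop := out = remove_dot_alt url
instance (url : String) (out : String) : Decidable (Spec_remove_dot url out) := by unfold Spec_remove_dot; infer_instance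

-- ===== CLAIM (what is proved, stated in full; the proofs are below) =====
def Claim_equal_remove_dot : Prop := ∀ (url : String), Dom_remove_dot url → Spec_remove_dot url (remove_dot url)

-- ===== LEMMAS AND PROOFS =====

-- dropping a leading run of non-dots first does not change dropWhile (· ≠ '.')
theorem dropWhile_ne_dropWhile_eq (c : Char) (hc : c ≠ '.') (l : List Char) :
    (l.dropWhile (· == c)).dropWhile (· ≠ '.') = l.dropWhile (· ≠ '.') := by
  induction l with
  | nil => simp
  | cons x xs ih =>
    by_cases hx : x = c
    · subst hx
      simp [hc]
      simpa using ih
    · simp [List.dropWhile_cons, hx]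

-- a suffix that is empty or starts with '.' survives dropWhile (· == c) for c ≠ '.'
theorem suffix_dropWhile_of_head_dot (c : Char) (hc : c ≠ '.') :
    ∀ (cur d : List Char), d <:+ cur → (d = [] ∨ d.head? = some '.') →
      d <:+ cur.dropWhile (· == c) := by
  intro cur
  induction cur with
  | nil =>
    intro d hd _; simpa using hd
  | cons x xs ih =>
    intro d hd hh
    by_cases hx : x = c
    · subst hx
      rcases List.suffix_cons_iff.mp hd with h | h
      · rcases hh with rfl | hh
        · exact List.nil_suffix
        · rw [h] at hh
          simp only [List.head?_cons, Option.some.injEq] at hh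
          exact absurd hh hc
      · have hrec := ih d h hh
        simpa [List.dropWhile_cons] using hrec
    · have hxc : (x == c) = false := by simp [hx]
      simpa [List.dropWhile_cons, hxc] using hd

-- head of dropWhile (· ≠ '.') is '.' (when nonempty)
theorem head_dropWhile_ne_dot (l : List Char) :
    l.dropWhile (· ≠ '.') = [] ∨ (l.dropWhile (· ≠ '.')).head? = some '.' := by
  induction l with
  | nil => simp
  | cons x xs ih =>
    by_cases hx : x = '.'
    · subst hx; simp
    · simpa [List.dropWhile_cons, hx] using ih

-- the core invariant of A's loop
theorem removeDotLoop_eq : ∀ (t cur : List Char), cur <:+ t →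
    (t.dropWhile (· ≠ '.')) <:+ cur →
    removeDotLoop t cur = (cur.dropWhile (· ≠ '.')).dropWhile (· == '.') := by
  intro t
  induction t with
  | nil =>
    intro cur hsub _
    have : cur = [] := List.suffix_nil.mp hsub
    subst this
    simp [removeDotLoop]
  | cons c rest ih =>
    intro cur hsub hdot
    by_cases hc : c = '.'
    · subst hc
      -- the whole tail '.'::rest is a suffix of cur, and cur a suffix of it: cur = '.'::rest
      have h1 : ('.' :: rest : List Char) <:+ cur := by
        simpa [List.dropWhile_cons] using hdot
      have hcur : cur = '.' :: rest :=
        List.IsSuffix.eq_of_length hsub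
          (le_antisymm hsub.length_le h1.length_le)
      subst hcur
      simp [removeDotLoop]
    · simp only [removeDotLoop, if_pos hc]
      have hd : (rest.dropWhile (· ≠ '.')) <:+ cur := by
        simpa [List.dropWhile_cons, hc] using hdot
      have hh := head_dropWhile_ne_dot rest
      have hsub' : cur.dropWhile (· == c) <:+ rest := by
        rcases List.suffix_cons_iff.mp hsub with h | h
        · subst h
          simpa [List.dropWhile_cons] using List.dropWhile_suffix (l := rest) (p := (· == c))
        · exact (List.dropWhile_suffix _).trans h
      have hd' : (rest.dropWhile (· ≠ '.')) <:+ cur.dropWhile (· == c) :=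
        suffix_dropWhile_of_head_dot c hc cur _ hd hh
      rw [ih _ hsub' hd', dropWhile_ne_dropWhile_eq c hc]

-- bSkipSeg stays below its argument
theorem bSkipSeg_le (l : List Char) : ∀ i, bSkipSeg l i ≤ i := by
  intro i
  induction i with
  | zero => simp [bSkipSeg]
  | succ j ih =>
    simp only [bSkipSeg]
    split
    · omega
    · omega

-- B's first loop computes: strip the maximal non-dot suffix of the first i chars
theorem bSkipSeg_take (l : List Char) : ∀ i, i ≤ l.length →
    l.take (bSkipSeg l i) = ((l.take i).reverse.dropWhile (· ≠ '.')).reverse := by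
  intro i
  induction i with
  | zero => simp [bSkipSeg]
  | succ j ih =>
    intro hj
    have hjlt : j < l.length := by omega
    have hget : l.getD j ' ' = l[j] := by
      simp [List.getD_eq_getElem?_getD, hjlt]
    have htake : l.take (j + 1) = l.take j ++ [l[j]] :=
      List.take_succ_eq_append_getElem hjlt
    simp only [bSkipSeg, hget]
    by_cases hx : l[j] = '.'
    · simp [hx, htake]
    · rw [if_pos hx, htake, ih (by omega)]
      have hrev : (List.take j l ++ [l[j]]).reverse = l[j] :: (List.take j l).reverse := by
        simp
      rw [hrev, List.dropWhile_cons, if_pos (by simpa using hx)]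

-- B's second loop: strip the maximal dot suffix of the first i chars
theorem bSkipDots_take (l : List Char) : ∀ i, i ≤ l.length →
    l.take (bSkipDots l i) = ((l.take i).reverse.dropWhile (· == '.')).reverse := by
  intro i
  induction i with
  | zero => simp [bSkipDots]
  | succ j ih =>
    intro hj
    have hjlt : j < l.length := by omega
    have hget : l.getD j ' ' = l[j] := by
      simp [List.getD_eq_getElem?_getD, hjlt]
    have htake : l.take (j + 1) = l.take j ++ [l[j]] :=
      List.take_succ_eq_append_getElem hjlt
    simp only [bSkipDots, hget]
    by_cases hx : l[j] = '.'
    · rw [if_pos hx, htake, ih (by omega)]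
      have hrev : (List.take j l ++ [l[j]]).reverse = l[j] :: (List.take j l).reverse := by
        simp
      rw [hrev, List.dropWhile_cons, if_pos (by simpa using hx)]
    · rw [if_neg hx, htake]
      have hrev : (List.take j l ++ [l[j]]).reverse = l[j] :: (List.take j l).reverse := by
        simp
      rw [hrev, List.dropWhile_cons, if_neg (by simpa using hx), ← hrev,
        List.reverse_reverse]

-- B computes the same characters as the closed form of A's loop
theorem alt_chars (l : List Char) :
    l.take (bSkipDots l (bSkipSeg l l.length)) =
      ((l.reverse.dropWhile (· ≠ '.')).dropWhile (· == '.')).reverse := by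
  have h1 := bSkipSeg_take l l.length (le_refl _)
  have hle : bSkipSeg l l.length ≤ l.length := bSkipSeg_le l _
  have h2 := bSkipDots_take l (bSkipSeg l l.length) hle
  rw [h2, h1, List.take_length, List.reverse_reverse]

-- ===== VERDICT (by name: the statement is the Claim_ definition above) =====
theorem remove_dot_spec : Claim_equal_remove_dot := by
  intro url _
  show String.ofList (removeDotLoop url.toList.reverse url.toList.reverse).reverse =
    String.ofList (url.toList.take (bSkipDots url.toList (bSkipSeg url.toList url.toList.length)))
  have hA := removeDotLoop_eq url.toList.reverse url.toList.reverse
    (List.suffix_refl _) (List.dropWhile_suffix _)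
  rw [hA, alt_chars]
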